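-- pv_equiv track=rewrite | github.com/aitsvet/agentic-chats-reporter | main.py | filter_correlation_output
-- ===== SOURCE A (Python) =====
-- def filter_correlation_output(output):
--     lines = output.split('\n')
--     result = []
--     capture = False
--     for line in lines:
--         if '## Chat-Usage Correlation Report' in line:
--             capture = True
--         if capture:
--             result.append(line)
--     return '\n'.join(result) + '\n' if result else ''
-- ===== SOURCE B (Python) =====
-- def filter_correlation_output(output):
--     marker = '## Chat-Usage Correlation Report'
--     pos = output.find(marker)
--     if pos == -1:
--         return ''
--     start = pos
--     while start > 0 and output[start - 1] != '\n':
--         start -= 1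
--     return output[start:] + '\n'
-- ===== Notes on version B (the rewrite author's own statement) =====
-- stated objective: alternative
-- what changed: Instead of splitting the text into a line list and accumulating lines under a boolean capture flag, B locates the first occurrence of the marker with str.find, walks back to the start of that line, and returns a single tail slice plus a newline.
import Mathlib
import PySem

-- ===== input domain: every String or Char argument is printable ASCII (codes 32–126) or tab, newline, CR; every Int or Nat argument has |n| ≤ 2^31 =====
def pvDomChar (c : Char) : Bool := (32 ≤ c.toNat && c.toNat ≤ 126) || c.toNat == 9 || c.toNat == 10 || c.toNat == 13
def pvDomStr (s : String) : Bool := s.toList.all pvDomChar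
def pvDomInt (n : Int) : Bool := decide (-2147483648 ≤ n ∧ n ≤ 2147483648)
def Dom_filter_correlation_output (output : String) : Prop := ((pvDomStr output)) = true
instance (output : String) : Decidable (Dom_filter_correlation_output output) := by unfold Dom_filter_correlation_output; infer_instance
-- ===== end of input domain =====

-- B replaces A's split-into-lines + capture-flag accumulation by a substring search plus one tail slice (alternative decomposition, same O(n) cost).

-- ===== PORT A =====
def pvMarker : List Char := "## Chat-Usage Correlation Report".toList

-- the loop body: 'if marker in line: capture = True; if capture: result.append(line)'
def pvStep (st : List (List Char) × Bool) (line : List Char) : List (List Char) × Bool :=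
  let capture := if PySem.Chars.isIn pvMarker line = true then true else st.2
  (if capture = true then st.1 ++ [line] else st.1, capture)

def filter_correlation_output (output : String) : String :=
  let lines := PySem.Chars.splitOn output.toList ['\n']
  let st := lines.foldl pvStep ([], false)
  if st.1 = [] then "" else String.ofList (PySem.Chars.join ['\n'] st.1 ++ ['\n'])

-- ===== PORT B =====
-- 'while start > 0 and output[start-1] != '\n': start -= 1' — exact: at every call site start ≤ pos < len output,
-- so the index start-1 is always in range and s[start]? is always 'some'.
def pvLineStart (s : List Char) : Nat → Nat
  | 0 => 0
  | start + 1 => if s[start]? = some '\n' then start + 1 else pvLineStart s start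

def filter_correlation_output_alt (output : String) : String :=
  let s := output.toList
  let pos := PySem.Chars.find s pvMarker
  if pos = -1 then ""
  else String.ofList (PySem.List.slice s (some ((pvLineStart s pos.toNat : Nat) : Int)) none ++ ['\n'])

-- ===== PRECONDITION & SPEC =====
def Spec_filter_correlation_output (output : String) (out : String) : Prop := out = filter_correlation_output_alt output
instance (output : String) (out : String) : Decidable (Spec_filter_correlation_output output out) := by unfold Spec_filter_correlation_output; infer_instance

-- ===== CLAIM (what is proved, stated in full; the proofs are below) =====
def Claim_equal_filter_correlation_output : Prop := ∀ (output : String), Dom_filter_correlation_output output → Spec_filter_correlation_output output (filter_correlation_output output)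

-- ===== LEMMAS AND PROOFS =====

-- list-level bodies of the two ports
def pvACore (s : List Char) : List Char :=
  let lines := PySem.Chars.splitOn s ['\n']
  let st := lines.foldl pvStep ([], false)
  if st.1 = [] then [] else PySem.Chars.join ['\n'] st.1 ++ ['\n']

def pvBCore (s : List Char) : List Char :=
  let pos := PySem.Chars.find s pvMarker
  if pos = -1 then []
  else PySem.List.slice s (some ((pvLineStart s pos.toNat : Nat) : Int)) none ++ ['\n']

lemma portA_eq (output : String) :
    filter_correlation_output output = String.ofList (pvACore output.toList) := by
  unfold filter_correlation_output pvACore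
  dsimp only
  split <;> rfl

lemma portB_eq (output : String) :
    filter_correlation_output_alt output = String.ofList (pvBCore output.toList) := by
  unfold filter_correlation_output_alt pvBCore
  dsimp only
  split <;> rfl

-- reference form of "split on a single newline character"
def refSplit (pre : List Char) : List Char → List (List Char)
  | [] => [pre]
  | c :: rest => if c = '\n' then pre :: refSplit [] rest else refSplit (pre ++ [c]) rest

lemma marker_ne_nil : pvMarker ≠ [] := by decide

lemma nl_not_mem_marker : '\n' ∉ pvMarker := by decide

lemma go_eq_ref (fuel : Nat) : ∀ (l cur : List Char) (acc : List (List Char)), l.length < fuel →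
    PySem.Chars.splitOn.go ['\n'] fuel l cur acc = acc.reverse ++ refSplit cur.reverse l := by
  induction fuel with
  | zero => intro l cur acc h; omega
  | succ fuel IH =>
    intro l cur acc h
    match l with
    | [] =>
      rw [PySem.Chars.splitOn.go]
      · simp [refSplit]
      · omega
    | c :: rest =>
      rw [PySem.Chars.splitOn.go]
      by_cases hc : c = '\n'
      · subst hc
        simp only [List.isPrefixOf, beq_self_eq_true, Bool.true_and, if_pos]
        rw [IH _ _ _ (by simpa using Nat.lt_of_succ_lt_succ h)]
        simp [refSplit]
      · have hpf : (['\n'].isPrefixOf (c :: rest)) = false := by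
          simp only [List.isPrefixOf, Bool.and_true, beq_eq_false_iff_ne]
          exact fun hh => hc hh.symm
        rw [hpf]
        simp only [Bool.false_eq_true, if_false]
        rw [IH _ _ _ (by simpa using Nat.lt_of_succ_lt_succ h)]
        simp [refSplit, hc]

lemma splitOn_eq_ref (s : List Char) : PySem.Chars.splitOn s ['\n'] = refSplit [] s := by
  rw [PySem.Chars.splitOn, go_eq_ref _ _ _ _ (by omega)]; simp

lemma refSplit_ne_nil (pre : List Char) (s : List Char) : refSplit pre s ≠ [] := by
  induction s generalizing pre with
  | nil => simp [refSplit]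
  | cons c rest IH => by_cases hc : c = '\n' <;> simp [refSplit, hc, IH]

lemma refSplit_no_nl (s : List Char) (h : '\n' ∉ s) : ∀ pre, refSplit pre s = [pre ++ s] := by
  induction s with
  | nil => intro pre; simp [refSplit]
  | cons c rest IH =>
    intro pre
    have hc : c ≠ '\n' := fun hh => h (hh ▸ List.mem_cons_self)
    rw [refSplit, if_neg hc, IH (fun hh => h (List.mem_cons_of_mem _ hh))]
    simp

lemma refSplit_break (l t : List Char) (h : '\n' ∉ l) :
    ∀ pre, refSplit pre (l ++ '\n' :: t) = (pre ++ l) :: refSplit [] t := by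
  induction l with
  | nil => intro pre; simp [refSplit]
  | cons c rest IH =>
    intro pre
    have hc : c ≠ '\n' := fun hh => h (hh ▸ List.mem_cons_self)
    rw [List.cons_append, refSplit, if_neg hc, IH (fun hh => h (List.mem_cons_of_mem _ hh))]
    simp

lemma join_ref (s : List Char) : ∀ pre, PySem.Chars.join ['\n'] (refSplit pre s) = pre ++ s := by
  induction s with
  | nil => intro pre; simp [refSplit, PySem.Chars.join, List.intercalate]
  | cons c rest IH =>
    intro pre
    by_cases hc : c = '\n'
    · subst hc
      rw [refSplit, if_pos rfl]
      rcases hne : refSplit ([] : List Char) rest with _ | ⟨a, parts⟩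
      · exact absurd hne (refSplit_ne_nil _ _)
      · rw [PySem.Chars.join_cons_cons, ← hne, IH]
        simp
    · rw [refSplit, if_neg hc, IH]
      simp

lemma foldl_pvStep_true (lines : List (List Char)) : ∀ acc,
    lines.foldl pvStep (acc, true) = (acc ++ lines, true) := by
  induction lines with
  | nil => intro acc; simp
  | cons l rest IH =>
    intro acc
    have : pvStep (acc, true) l = (acc ++ [l], true) := by simp [pvStep]
    rw [List.foldl_cons, this, IH]
    simp

lemma prefix_split {sub l t : List Char} (hnl : '\n' ∉ sub) (h : sub <+: l ++ '\n' :: t) :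
    sub <+: l := by
  by_cases hle : sub.length ≤ l.length
  · have h1 : sub = (l ++ '\n' :: t).take sub.length := by
      obtain ⟨r, hr⟩ := h
      rw [← hr, List.take_left]
    rw [List.take_append_of_le_length hle] at h1
    exact h1 ▸ List.take_prefix _ _
  · exfalso
    obtain ⟨r, hr⟩ := h
    have hlen : l.length < sub.length := by omega
    have h2 : (sub ++ r)[l.length]? = sub[l.length]? := List.getElem?_append_left hlen
    have h3 : (l ++ '\n' :: t)[l.length]? = some '\n' := by
      rw [List.getElem?_append_right (le_refl _)]
      simp
    rw [hr, h3] at h2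
    exact hnl (List.mem_of_getElem? h2.symm)

lemma infix_iff_exists_drop (sub s : List Char) : sub <:+: s ↔ ∃ j, sub <+: s.drop j := by
  rw [← PySem.Chars.isIn_iff_infix, ← PySem.Chars.exists_prefix_drop_iff_isIn]

lemma find_eq_of_spec {s sub : List Char} {n : Nat} (h1 : sub <+: s.drop n)
    (h2 : ∀ i < n, ¬ sub <+: s.drop i) : PySem.Chars.find s sub = (n : Int) := by
  have hinf : sub <:+: s := (infix_iff_exists_drop sub s).2 ⟨n, h1⟩
  have h0 : 0 ≤ PySem.Chars.find s sub := (PySem.Chars.find_nonneg_iff s sub).2 hinf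
  obtain ⟨hp, hmin⟩ := PySem.Chars.find_spec h0
  have := Int.toNat_of_nonneg h0
  rcases Nat.lt_trichotomy (PySem.Chars.find s sub).toNat n with hlt | heq | hgt
  · exact absurd hp (h2 _ hlt)
  · omega
  · exact absurd h1 (hmin _ hgt)

lemma drop_boundary (l t : List Char) (c : Char) {j : Nat} (hj : j ≤ l.length) :
    (l ++ c :: t).drop j = l.drop j ++ c :: t := List.drop_append_of_le_length hj

lemma drop_past (l t : List Char) (c : Char) (k : Nat) :
    (l ++ c :: t).drop (l.length + 1 + k) = t.drop k := by
  have h1 : l.length + 1 + k = l.length + (1 + k) := by omega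
  rw [h1, List.drop_append]
  rw [List.drop_eq_nil_of_le (by omega), show l.length + (1 + k) - l.length = k + 1 by omega,
    List.drop_succ_cons, List.nil_append]

lemma find_append {sub l t : List Char} (_hsub : sub ≠ []) (hnl : '\n' ∉ sub)
    (hl : ¬ sub <:+: l) :
    PySem.Chars.find (l ++ '\n' :: t) sub =
      if PySem.Chars.find t sub = -1 then -1 else (l.length : Int) + 1 + PySem.Chars.find t sub := by
  have hnot_s_j : ∀ j ≤ l.length, ¬ sub <+: (l ++ '\n' :: t).drop j := by
    intro j hj hpf
    rw [drop_boundary l t _ hj] at hpf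
    exact hl ((infix_iff_exists_drop sub l).2 ⟨j, prefix_split hnl hpf⟩)
  by_cases hft : PySem.Chars.find t sub = -1
  · rw [if_pos hft]
    rw [PySem.Chars.find_eq_neg_one_iff] at hft ⊢
    intro hinf
    obtain ⟨j, hj⟩ := (infix_iff_exists_drop _ _).1 hinf
    by_cases hjle : j ≤ l.length
    · exact hnot_s_j j hjle hj
    · have : j = l.length + 1 + (j - l.length - 1) := by omega
      rw [this, drop_past] at hj
      exact hft ((infix_iff_exists_drop _ _).2 ⟨_, hj⟩)
  · rw [if_neg hft]
    have h0 : 0 ≤ PySem.Chars.find t sub := by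
      have := PySem.Chars.neg_one_le_find t sub
      omega
    obtain ⟨hp, hmin⟩ := PySem.Chars.find_spec h0
    set k := (PySem.Chars.find t sub).toNat with hk
    have heq : PySem.Chars.find (l ++ '\n' :: t) sub = ((l.length + 1 + k : Nat) : Int) := by
      apply find_eq_of_spec
      · rw [drop_past]; exact hp
      · intro i hi
        by_cases hile : i ≤ l.length
        · exact hnot_s_j i hile
        · have : i = l.length + 1 + (i - l.length - 1) := by omega
          rw [this, drop_past]
          exact hmin _ (by omega)
    rw [heq]
    push_cast
    omega

lemma lineStart_eq_zero (s : List Char) : ∀ n, (∀ i < n, s[i]? ≠ some '\n') →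
    pvLineStart s n = 0 := by
  intro n
  induction n with
  | zero => intro _; rfl
  | succ m IH =>
    intro h
    rw [pvLineStart, if_neg (h m (by omega))]
    exact IH (fun i hi => h i (by omega))

lemma lineStart_append (l t : List Char) : ∀ k,
    pvLineStart (l ++ '\n' :: t) (l.length + 1 + k) = l.length + 1 + pvLineStart t k := by
  intro k
  induction k with
  | zero =>
    have hidx : (l ++ '\n' :: t)[l.length]? = some '\n' := by
      rw [List.getElem?_append_right (le_refl _)]; simp
    rw [show l.length + 1 + 0 = l.length + 1 by omega]
    rw [pvLineStart.eq_2, if_pos hidx]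
    rfl
  | succ m IH =>
    have hidx : (l ++ '\n' :: t)[l.length + 1 + m]? = t[m]? := by
      rw [List.getElem?_append_right (by omega)]
      rw [show l.length + 1 + m - l.length = m + 1 by omega, List.getElem?_cons_succ]
    rw [show l.length + 1 + (m + 1) = (l.length + 1 + m) + 1 by omega, pvLineStart.eq_2, hidx]
    rw [pvLineStart.eq_2 t]
    by_cases hc : t[m]? = some '\n'
    · rw [if_pos hc, if_pos hc]; omega
    · rw [if_neg hc, if_neg hc, IH]

lemma exists_split (s : List Char) (h : '\n' ∈ s) :
    ∃ l t, s = l ++ '\n' :: t ∧ '\n' ∉ l := by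
  induction s with
  | nil => cases h
  | cons c rest IH =>
    by_cases hc : c = '\n'
    · exact ⟨[], rest, by rw [hc]; rfl, by simp⟩
    · have : '\n' ∈ rest := by
        rcases List.mem_cons.1 h with h1 | h1
        · exact absurd h1.symm hc
        · exact h1
      obtain ⟨l, t, hst, hnl⟩ := IH this
      exact ⟨c :: l, t, by rw [hst]; rfl, by
        intro hm
        rcases List.mem_cons.1 hm with h1 | h1
        · exact hc h1.symm
        · exact hnl h1⟩

lemma core_eq_aux : ∀ (n : Nat) (s : List Char), s.length = n → pvACore s = pvBCore s := by
  intro n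
  induction n using Nat.strong_induction_on with
  | _ n IH =>
    intro s hs
    by_cases hnl : '\n' ∈ s
    · obtain ⟨l, t, rfl, hlnl⟩ := exists_split s hnl
      have hlent : t.length < n := by
        subst hs; simp only [List.length_append, List.length_cons]; omega
      have IHt : pvACore t = pvBCore t := IH t.length hlent t rfl
      have hA_split : PySem.Chars.splitOn (l ++ '\n' :: t) ['\n'] = l :: refSplit [] t := by
        rw [splitOn_eq_ref, refSplit_break l t hlnl]; simp
      by_cases hin : PySem.Chars.isIn pvMarker l = true
      · -- marker occurs in the first line: both sides return the whole string + '\n'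
        have hstep : pvStep ([], false) l = ([l], true) := by simp [pvStep, hin]
        have hA : pvACore (l ++ '\n' :: t) = (l ++ '\n' :: t) ++ ['\n'] := by
          unfold pvACore
          dsimp only
          rw [hA_split, List.foldl_cons, hstep, foldl_pvStep_true]
          dsimp only
          rw [if_neg (by simp)]
          have hjoin : ([l] ++ refSplit [] t) = refSplit [] (l ++ '\n' :: t) := by
            rw [refSplit_break l t hlnl]; simp
          rw [hjoin, join_ref]
          simp
        have hinf : pvMarker <:+: l := (PySem.Chars.isIn_iff_infix _ _).1 hin
        obtain ⟨pre, suf, hpre⟩ := hinf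
        have hjlen : pre.length + pvMarker.length + suf.length = l.length := by
          rw [← hpre]; simp; omega
        have hmlen : pvMarker.length = 32 := by decide
        have hocc : pvMarker <+: (l ++ '\n' :: t).drop pre.length := by
          rw [drop_boundary l t _ (by omega)]
          have hdl : l.drop pre.length = pvMarker ++ suf := by
            rw [← hpre, List.append_assoc, List.drop_left]
          rw [hdl, List.append_assoc]
          exact List.prefix_append _ _
        have hfind0 : 0 ≤ PySem.Chars.find (l ++ '\n' :: t) pvMarker :=
          (PySem.Chars.find_nonneg_iff _ _).2
            ((infix_iff_exists_drop _ _).2 ⟨pre.length, hocc⟩)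
        obtain ⟨hp, hmin⟩ := PySem.Chars.find_spec hfind0
        have htoNat_le : (PySem.Chars.find (l ++ '\n' :: t) pvMarker).toNat ≤ pre.length :=
          Nat.le_of_not_lt fun hgt => hmin pre.length hgt hocc
        have hB : pvBCore (l ++ '\n' :: t) = (l ++ '\n' :: t) ++ ['\n'] := by
          unfold pvBCore
          dsimp only
          rw [if_neg (by omega)]
          have hls : pvLineStart (l ++ '\n' :: t)
              (PySem.Chars.find (l ++ '\n' :: t) pvMarker).toNat = 0 := by
            apply lineStart_eq_zero
            intro i hi heq
            have hil : i < l.length := by omega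
            rw [List.getElem?_append_left hil] at heq
            exact hlnl (List.mem_of_getElem? heq)
          rw [hls, PySem.List.slice_from _ (by omega)]
          simp
        rw [hA, hB]
      · -- marker not in the first line: both sides recurse to t
        have hstep : pvStep ([], false) l = ([], false) := by simp [pvStep, hin]
        have hA : pvACore (l ++ '\n' :: t) = pvACore t := by
          unfold pvACore
          dsimp only
          rw [hA_split, List.foldl_cons, hstep, splitOn_eq_ref]
        have hninf : ¬ pvMarker <:+: l := fun hh => hin ((PySem.Chars.isIn_iff_infix _ _).2 hh)
        have hfa := find_append marker_ne_nil nl_not_mem_marker hninf (t := t)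
        by_cases hft : PySem.Chars.find t pvMarker = -1
        · have hB : pvBCore (l ++ '\n' :: t) = [] := by
            unfold pvBCore
            dsimp only
            rw [hfa, if_pos hft]
            simp
          have hBt : pvBCore t = [] := by
            unfold pvBCore
            dsimp only
            rw [if_pos hft]
          rw [hA, IHt, hBt, hB]
        · have h0 : 0 ≤ PySem.Chars.find t pvMarker := by
            have := PySem.Chars.neg_one_le_find t pvMarker
            omega
          have hB : pvBCore (l ++ '\n' :: t) = pvBCore t := by
            unfold pvBCore
            dsimp only
            rw [hfa, if_neg hft, if_neg (by omega), if_neg hft]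
            have htn : ((l.length : Int) + 1 + PySem.Chars.find t pvMarker).toNat =
                l.length + 1 + (PySem.Chars.find t pvMarker).toNat := by omega
            rw [htn, lineStart_append,
              PySem.List.slice_from _ (by omega), PySem.List.slice_from _ (by omega),
              Int.toNat_natCast, Int.toNat_natCast, drop_past]
          rw [hA, IHt, hB]
    · -- no newline at all: a single line
      have hsplit : PySem.Chars.splitOn s ['\n'] = [s] := by
        rw [splitOn_eq_ref, refSplit_no_nl s hnl]; simp
      by_cases hin : PySem.Chars.isIn pvMarker s = true
      · have hA : pvACore s = s ++ ['\n'] := by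
          unfold pvACore
          dsimp only
          rw [hsplit, List.foldl_cons,
            show pvStep ([], false) s = ([s], true) from by simp [pvStep, hin],
            List.foldl_nil]
          dsimp only
          rw [if_neg (by simp)]
          rw [PySem.Chars.join_singleton]
        have hfind0 : 0 ≤ PySem.Chars.find s pvMarker :=
          (PySem.Chars.find_nonneg_iff _ _).2 ((PySem.Chars.isIn_iff_infix _ _).1 hin)
        have hB : pvBCore s = s ++ ['\n'] := by
          unfold pvBCore
          dsimp only
          rw [if_neg (by omega)]
          have hls : pvLineStart s (PySem.Chars.find s pvMarker).toNat = 0 := by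
            apply lineStart_eq_zero
            intro i _ heq
            exact hnl (List.mem_of_getElem? heq)
          rw [hls, PySem.List.slice_from _ (by omega)]
          simp
        rw [hA, hB]
      · have hfeq : PySem.Chars.find s pvMarker = -1 :=
          (PySem.Chars.find_eq_neg_one_iff _ _).2
            (fun hinf => hin ((PySem.Chars.isIn_iff_infix _ _).2 hinf))
        have hA : pvACore s = [] := by
          unfold pvACore
          dsimp only
          rw [hsplit, List.foldl_cons,
            show pvStep ([], false) s = ([], false) from by simp [pvStep, hin],
            List.foldl_nil]
          simp
        have hB : pvBCore s = [] := by
          unfold pvBCore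
          dsimp only
          rw [if_pos hfeq]
        rw [hA, hB]

lemma core_eq (s : List Char) : pvACore s = pvBCore s := core_eq_aux s.length s rfl

-- ===== VERDICT (by name: the statement is the Claim_ definition above) =====
theorem filter_correlation_output_spec : Claim_equal_filter_correlation_output := by
  intro output _
  unfold Spec_filter_correlation_output
  rw [portA_eq, portB_eq, core_eq]
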